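-- pv_equiv track=rewrite | github.com/bcbogdan/document_search | boolean_search.py | evaluate_collection
-- ===== SOURCE A (Python) =====
-- def evaluate_collection(collection):
--     """
--     Based on the file lists the method intersects or subtracts sets
--     Reuniune pentru OR !!!!
--     """
--     result = set(collection[0][0])
--
--     for file_list, negated in collection[1:]:
--         if negated:
--             result = result - set(file_list)
--         else:
--             result = result.intersection(set(file_list))
--
--     return result
-- ===== SOURCE B (Python) =====
-- def evaluate_collection(collection):
--     """Two grouped passes instead of a branching fold: intersect the
--     non-negated lists into a positives set, union the negated lists into a
--     negatives set, and subtract once at the end."""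
--     positives = set(collection[0][0])
--     for file_list, negated in collection[1:]:
--         if not negated:
--             positives &= set(file_list)
--     negatives = set()
--     for file_list, negated in collection[1:]:
--         if negated:
--             negatives |= set(file_list)
--     return positives - negatives
-- ===== Notes on version B (the rewrite author's own statement) =====
-- stated objective: alternative
-- what changed: Replaces A's single fold that branches between set difference and intersection with two grouped passes (intersect all non-negated lists into a positives set, union all negated lists into one negatives set) followed by a single subtraction, exploiting that subtracting several sets equals subtracting their union and that intersection and difference commute.
import Mathlib
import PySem

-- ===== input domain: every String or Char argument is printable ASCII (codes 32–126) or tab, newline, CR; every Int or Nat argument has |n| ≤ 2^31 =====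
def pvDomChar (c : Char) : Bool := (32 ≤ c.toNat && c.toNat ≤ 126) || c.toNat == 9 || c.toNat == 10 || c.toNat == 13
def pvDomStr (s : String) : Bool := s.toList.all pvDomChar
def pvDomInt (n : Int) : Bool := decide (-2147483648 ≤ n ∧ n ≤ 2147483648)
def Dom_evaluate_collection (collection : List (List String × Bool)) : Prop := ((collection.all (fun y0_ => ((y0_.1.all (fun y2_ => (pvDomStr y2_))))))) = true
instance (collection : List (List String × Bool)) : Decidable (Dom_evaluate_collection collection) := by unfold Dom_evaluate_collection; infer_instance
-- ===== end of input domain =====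

-- B replaces A's single branching fold (difference/intersection per step) with two grouped
-- passes — intersect non-negated lists, union negated lists — and one final subtraction;
-- objective: alternative decomposition of the same cost.


-- ===== PORT A =====
-- result = set(collection[0][0]); for file_list, negated in collection[1:]:
--   result = result - set(file_list)  /  result = result.intersection(set(file_list))
def evaluate_collection (collection : List (List String × Bool)) : List String :=
  match collection with
  | [] => []   -- unreachable under Pre_: Python raises IndexError on collection[0]
  | first :: rest =>
    rest.foldl
      (fun result p =>
        if p.2 then PySem.Set.diff result (PySem.Set.ofList p.1)
        else PySem.Set.inter result (PySem.Set.ofList p.1))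
      (PySem.Set.ofList first.1)

-- ===== PORT B =====
-- positives pass (intersections), negatives pass (unions), one final subtraction
def evaluate_collection_alt (collection : List (List String × Bool)) : List String :=
  match collection with
  | [] => []   -- unreachable under Pre_: Python raises IndexError on collection[0]
  | first :: rest =>
    let positives :=
      rest.foldl
        (fun acc p => if !p.2 then PySem.Set.inter acc (PySem.Set.ofList p.1) else acc)
        (PySem.Set.ofList first.1)
    let negatives :=
      rest.foldl
        (fun acc p => if p.2 then PySem.Set.union acc (PySem.Set.ofList p.1) else acc)
        PySem.Set.empty
    PySem.Set.diff positives negatives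

-- ===== PRECONDITION & SPEC =====
-- Pre_ excludes only the empty collection, on which Python A (and B) raise IndexError.
def Pre_evaluate_collection (collection : List (List String × Bool)) : Prop := collection ≠ []
instance (collection : List (List String × Bool)) : Decidable (Pre_evaluate_collection collection) := by unfold Pre_evaluate_collection; infer_instance
def pvWitness_evaluate_collection : (List (List String × Bool)) := [(["a", "b"], false), (["b"], true)]
def Spec_evaluate_collection (collection : List (List String × Bool)) (out : List String) : Prop := out = evaluate_collection_alt collection
instance (collection : List (List String × Bool)) (out : List String) : Decidable (Spec_evaluate_collection collection out) := by unfold Spec_evaluate_collection; infer_instance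

-- ===== CLAIM (what is proved, stated in full; the proofs are below) =====
def Claim_equal_evaluate_collection : Prop := ∀ (collection : List (List String × Bool)), Dom_evaluate_collection collection → Pre_evaluate_collection collection → Spec_evaluate_collection collection (evaluate_collection collection)

-- ===== LEMMAS AND PROOFS =====

-- Subtracting t after subtracting n is subtracting their union (filters compose).
lemma pv_diff_diff (s t u : List String) :
    PySem.Set.diff (PySem.Set.diff s t) u = PySem.Set.diff s (PySem.Set.union t u) := by
  simp only [PySem.Set.diff, List.filter_filter]
  apply List.filter_congr
  intro x _
  have h := PySem.Set.mem_union (s := t) (t := u) (y := x)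
  by_cases hx : x ∈ PySem.Set.union t u <;> simp_all <;> tauto

-- Intersection commutes past a pending subtraction (filters commute).
lemma pv_inter_diff (s n t : List String) :
    PySem.Set.inter (PySem.Set.diff s n) t = PySem.Set.diff (PySem.Set.inter s t) n := by
  simp [PySem.Set.inter, PySem.Set.diff, List.filter_filter, Bool.and_comm]

lemma pv_diff_empty (s : List String) : PySem.Set.diff s PySem.Set.empty = s := by
  simp [PySem.Set.diff, PySem.Set.empty]

-- Invariant: A's interleaved fold started from base - neg equals
-- (B's positives fold from base) - (B's negatives fold from neg).
lemma pv_loop_eq (rest : List (List String × Bool)) (base neg : List String) :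
    rest.foldl
      (fun result p =>
        if p.2 then PySem.Set.diff result (PySem.Set.ofList p.1)
        else PySem.Set.inter result (PySem.Set.ofList p.1))
      (PySem.Set.diff base neg)
    = PySem.Set.diff
        (rest.foldl
          (fun acc p => if !p.2 then PySem.Set.inter acc (PySem.Set.ofList p.1) else acc)
          base)
        (rest.foldl
          (fun acc p => if p.2 then PySem.Set.union acc (PySem.Set.ofList p.1) else acc)
          neg) := by
  induction rest generalizing base neg with
  | nil => rfl
  | cons p rest ih =>
    rcases p with ⟨fl, negated⟩
    cases negated with
    | true =>
      simpa [List.foldl_cons, pv_diff_diff] using ih base (PySem.Set.union neg (PySem.Set.ofList fl))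
    | false =>
      simpa [List.foldl_cons, pv_inter_diff] using ih (PySem.Set.inter base (PySem.Set.ofList fl)) neg

-- ===== VERDICT (by name: the statement is the Claim_ definition above) =====
theorem evaluate_collection_spec : Claim_equal_evaluate_collection := by
  intro collection _ hpre
  match collection with
  | [] => exact absurd rfl hpre
  | first :: rest =>
    show evaluate_collection (first :: rest) = evaluate_collection_alt (first :: rest)
    simp only [evaluate_collection, evaluate_collection_alt]
    rw [← pv_diff_empty (PySem.Set.ofList first.1), pv_loop_eq, pv_diff_empty]
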